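-- pv_equiv track=rewrite | github.com/johnfontaine/chess-notebooks | chess_analysis/dataset.py | _analyze_streaks
-- ===== SOURCE A (Python) =====
-- def _analyze_streaks(results: list[str]) -> tuple[int, int, int, int]:
--     """
--     Analyze win/loss streaks.
--
--     Returns:
--         Tuple of (current_streak, longest_win, longest_loss, streak_changes)
--     """
--     if not results:
--         return 0, 0, 0, 0
--
--     current = 0
--     longest_win = 0
--     longest_loss = 0
--     streak_changes = 0
--     prev_result = None
--
--     for result in results:
--         if result == "win":
--             if current >= 0:
--                 current += 1
--             else:
--                 streak_changes += 1
--                 current = 1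
--             longest_win = max(longest_win, current)
--         elif result == "loss":
--             if current <= 0:
--                 current -= 1
--             else:
--                 streak_changes += 1
--                 current = -1
--             longest_loss = max(longest_loss, abs(current))
--         else:  # draw
--             if current != 0:
--                 streak_changes += 1
--             current = 0
--
--         prev_result = result
--
--     return current, longest_win, longest_loss, streak_changes
-- ===== SOURCE B (Python) =====
-- def _analyze_streaks(results: list[str]) -> tuple[int, int, int, int]:
--     """Group-run decomposition: split into maximal runs of win/loss/draw, then
--     read each statistic off the run list directly."""
--     def key(r):
--         return r if r in ("win", "loss") else "draw"
--
--     groups = []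
--     i, m = 0, len(results)
--     while i < m:
--         k = key(results[i])
--         j = i + 1
--         while j < m and key(results[j]) == k:
--             j += 1
--         groups.append((k, j - i))
--         i = j
--
--     longest_win = 0
--     for k, n in groups:
--         if k == "win":
--             longest_win = max(longest_win, n)
--     longest_loss = 0
--     for k, n in groups:
--         if k == "loss":
--             longest_loss = max(longest_loss, n)
--     streak_changes = 0
--     for k, _ in groups[:-1]:
--         if k in ("win", "loss"):
--             streak_changes += 1
--     if not groups:
--         current = 0
--     else:
--         k, n = groups[-1]
--         current = n if k == "win" else (-n if k == "loss" else 0)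
--     return current, longest_win, longest_loss, streak_changes
-- ===== Notes on version B (the rewrite author's own statement) =====
-- stated objective: alternative
-- what changed: Replaces A's single stateful element-by-element loop (signed current counter updated per result) by a run-length/groupby decomposition: the result list is first split into maximal runs of win/loss/draw, and each statistic (signed last-run length, max win-run, max loss-run, count of non-draw runs before the last) is read directly off the run list.
import Mathlib
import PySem

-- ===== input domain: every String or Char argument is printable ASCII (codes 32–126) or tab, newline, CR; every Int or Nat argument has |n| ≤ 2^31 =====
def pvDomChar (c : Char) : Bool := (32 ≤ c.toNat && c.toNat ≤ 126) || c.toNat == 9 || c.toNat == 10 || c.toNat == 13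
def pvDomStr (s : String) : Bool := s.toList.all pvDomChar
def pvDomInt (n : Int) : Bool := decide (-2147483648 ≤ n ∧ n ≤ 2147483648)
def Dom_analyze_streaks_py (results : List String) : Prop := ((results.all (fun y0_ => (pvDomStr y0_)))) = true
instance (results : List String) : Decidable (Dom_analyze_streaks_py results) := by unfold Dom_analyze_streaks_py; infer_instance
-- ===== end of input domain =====

-- B replaces A's single stateful loop by a run-length (groupby-style) decomposition and reads
-- each statistic off the run list; objective: alternative decomposition (not faster).

-- ===== PORT A =====
def pvStepA (st : Int × Int × Int × Int) (result : String) : Int × Int × Int × Int :=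
  match st with
  | (current, longest_win, longest_loss, streak_changes) =>
    if result = "win" then
      if current ≥ 0 then
        (current + 1, max longest_win (current + 1), longest_loss, streak_changes)
      else
        (1, max longest_win 1, longest_loss, streak_changes + 1)
    else if result = "loss" then
      if current ≤ 0 then
        (current - 1, longest_win, max longest_loss |current - 1|, streak_changes)
      else
        (-1, longest_win, max longest_loss |(-1 : Int)|, streak_changes + 1)
    else
      if current ≠ 0 then
        (0, longest_win, longest_loss, streak_changes + 1)
      else
        (0, longest_win, longest_loss, streak_changes)

def analyze_streaks_py (results : List String) : Int × Int × Int × Int :=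
  if results = [] then (0, 0, 0, 0)
  else results.foldl pvStepA (0, 0, 0, 0)

-- ===== PORT B =====
def pvKey (r : String) : String := if r = "win" ∨ r = "loss" then r else "draw"

def pvGroups : List String → List (String × Int)
  | [] => []
  | x :: xs =>
      (pvKey x, 1 + ((xs.takeWhile (fun y => pvKey y == pvKey x)).length : Int)) ::
        pvGroups (xs.dropWhile (fun y => pvKey y == pvKey x))
  termination_by l => l.length
  decreasing_by
    simp only [List.length_cons]
    exact Nat.lt_succ_of_le (List.length_dropWhile_le _ _)

def analyze_streaks_py_alt (results : List String) : Int × Int × Int × Int :=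
  let groups := pvGroups results
  let longest_win := groups.foldl (fun m g => if g.1 = "win" then max m g.2 else m) 0
  let longest_loss := groups.foldl (fun m g => if g.1 = "loss" then max m g.2 else m) 0
  let streak_changes :=
    groups.dropLast.foldl (fun c g => if g.1 = "win" ∨ g.1 = "loss" then c + 1 else c) 0
  let current :=
    match groups.getLast? with
    | none => 0
    | some (k, n) => if k = "win" then n else if k = "loss" then -n else 0
  (current, longest_win, longest_loss, streak_changes)

-- ===== PRECONDITION & SPEC =====
def Spec_analyze_streaks_py (results : List String) (out : Int × Int × Int × Int) : Prop := out = analyze_streaks_py_alt results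
instance (results : List String) (out : Int × Int × Int × Int) : Decidable (Spec_analyze_streaks_py results out) := by unfold Spec_analyze_streaks_py; infer_instance

-- ===== CLAIM (what is proved, stated in full; the proofs are below) =====
def Claim_equal_analyze_streaks_py : Prop := ∀ (results : List String), Dom_analyze_streaks_py results → Spec_analyze_streaks_py results (analyze_streaks_py results)

-- ===== LEMMAS AND PROOFS =====

-- group-at-a-time step that summarizes A's loop over one maximal run
def pvGstep (st : Int × Int × Int × Int) (g : String × Int) : Int × Int × Int × Int :=
  match st, g with
  | (cur, lw, ll, sc), (k, n) =>
    if k = "win" then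
      ((if cur ≥ 0 then cur else 0) + n, max lw ((if cur ≥ 0 then cur else 0) + n), ll,
        sc + (if cur < 0 then 1 else 0))
    else if k = "loss" then
      ((if cur ≤ 0 then cur else 0) - n, lw, max ll (n - (if cur ≤ 0 then cur else 0)),
        sc + (if cur > 0 then 1 else 0))
    else
      (0, lw, ll, sc + (if cur ≠ 0 then 1 else 0))

theorem pvKey_cases (y : String) : pvKey y = "win" ∨ pvKey y = "loss" ∨ pvKey y = "draw" := by
  unfold pvKey; split_ifs with h
  · rcases h with rfl | rfl
    · exact Or.inl rfl
    · exact Or.inr (Or.inl rfl)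
  · exact Or.inr (Or.inr rfl)

theorem pvKey_eq_win {y : String} (h : pvKey y = "win") : y = "win" := by
  unfold pvKey at h; split_ifs at h with h1
  · exact h
  · simp at h

theorem pvKey_eq_loss {y : String} (h : pvKey y = "loss") : y = "loss" := by
  unfold pvKey at h; split_ifs at h with h1
  · exact h
  · simp at h

theorem pvKey_eq_draw {y : String} (h : pvKey y = "draw") : y ≠ "win" ∧ y ≠ "loss" := by
  constructor <;> rintro rfl <;> simp [pvKey] at h

theorem run_win (l : List String) (h : ∀ y ∈ l, pvKey y = "win") :
    ∀ cur lw ll sc : Int, 0 ≤ cur → cur ≤ lw →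
    l.foldl pvStepA (cur, lw, ll, sc) = (cur + l.length, max lw (cur + l.length), ll, sc) := by
  induction l with
  | nil => intro cur lw ll sc h0 h1; simp [Prod.ext_iff]; omega
  | cons y l ih =>
    intro cur lw ll sc h0 h1
    have hy : y = "win" := pvKey_eq_win (h y (by simp))
    subst hy
    rw [List.foldl_cons]
    have hstep : pvStepA (cur, lw, ll, sc) "win"
        = (cur + 1, max lw (cur + 1), ll, sc) := by
      simp [pvStepA, h0]
    rw [hstep, ih (fun y hy => h y (by simp [hy])) (cur + 1) _ ll sc (by omega) (le_max_right _ _)]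
    simp [Prod.ext_iff]; omega

theorem run_loss (l : List String) (h : ∀ y ∈ l, pvKey y = "loss") :
    ∀ cur lw ll sc : Int, cur ≤ 0 → -cur ≤ ll →
    l.foldl pvStepA (cur, lw, ll, sc) = (cur - l.length, lw, max ll (l.length - cur), sc) := by
  induction l with
  | nil => intro cur lw ll sc h0 h1; simp [Prod.ext_iff]; omega
  | cons y l ih =>
    intro cur lw ll sc h0 h1
    have hy : y = "loss" := pvKey_eq_loss (h y (by simp))
    subst hy
    rw [List.foldl_cons]
    have hstep : pvStepA (cur, lw, ll, sc) "loss"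
        = (cur - 1, lw, max ll (1 - cur), sc) := by
      simp [pvStepA, h0]
      rw [abs_of_nonpos (by omega)]
      omega
    rw [hstep, ih (fun y hy => h y (by simp [hy])) (cur - 1) lw _ sc (by omega) (by omega)]
    simp [Prod.ext_iff]; omega

theorem run_draw (l : List String) (h : ∀ y ∈ l, pvKey y = "draw") :
    ∀ lw ll sc : Int, l.foldl pvStepA (0, lw, ll, sc) = (0, lw, ll, sc) := by
  induction l with
  | nil => intro lw ll sc; rfl
  | cons y l ih =>
    intro lw ll sc
    obtain ⟨h1, h2⟩ := pvKey_eq_draw (h y (by simp))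
    rw [List.foldl_cons]
    have hstep : pvStepA (0, lw, ll, sc) y = (0, lw, ll, sc) := by
      simp [pvStepA, h1, h2]
    rw [hstep, ih (fun y hy => h y (by simp [hy]))]

theorem foldl_run (x : String) (run : List String) (h : ∀ y ∈ run, pvKey y = pvKey x)
    (cur lw ll sc : Int) :
    (x :: run).foldl pvStepA (cur, lw, ll, sc)
      = pvGstep (cur, lw, ll, sc) (pvKey x, 1 + (run.length : Int)) := by
  rcases pvKey_cases x with hk | hk | hk <;> rw [hk] <;> rw [hk] at h
  · -- win run
    have hx : x = "win" := pvKey_eq_win hk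
    subst hx
    rw [List.foldl_cons]
    by_cases h0 : 0 ≤ cur
    · have hstep : pvStepA (cur, lw, ll, sc) "win"
          = (cur + 1, max lw (cur + 1), ll, sc) := by simp [pvStepA, h0]
      rw [hstep, run_win run h (cur + 1) _ ll sc (by omega) (le_max_right _ _)]
      simp [pvGstep, Prod.ext_iff]
      split_ifs <;> omega
    · have hstep : pvStepA (cur, lw, ll, sc) "win"
          = (1, max lw 1, ll, sc + 1) := by
        simp [pvStepA]; omega
      rw [hstep, run_win run h 1 _ ll (sc + 1) (by omega) (le_max_right _ _)]
      simp [pvGstep, Prod.ext_iff]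
      split_ifs <;> omega
  · -- loss run
    have hx : x = "loss" := pvKey_eq_loss hk
    subst hx
    rw [List.foldl_cons]
    by_cases h0 : cur ≤ 0
    · have hstep : pvStepA (cur, lw, ll, sc) "loss"
          = (cur - 1, lw, max ll (1 - cur), sc) := by
        simp [pvStepA, h0]
        rw [abs_of_nonpos (by omega)]
        omega
      rw [hstep, run_loss run h (cur - 1) lw _ sc (by omega) (by omega)]
      simp [pvGstep, Prod.ext_iff]
      split_ifs <;> omega
    · have hstep : pvStepA (cur, lw, ll, sc) "loss"
          = (-1, lw, max ll 1, sc + 1) := by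
        simp [pvStepA]; omega
      rw [hstep, run_loss run h (-1) lw _ (sc + 1) (by omega) (by omega)]
      simp [pvGstep, Prod.ext_iff]
      split_ifs <;> omega
  · -- draw run
    obtain ⟨h1, h2⟩ := pvKey_eq_draw hk
    rw [List.foldl_cons]
    have hstep : pvStepA (cur, lw, ll, sc) x
        = (0, lw, ll, sc + (if cur ≠ 0 then 1 else 0)) := by
      simp [pvStepA, h1, h2]
      split_ifs <;> simp_all
    rw [hstep, run_draw run h]
    simp [pvGstep]

theorem foldl_groups (results : List String) :
    ∀ s : Int × Int × Int × Int,
      results.foldl pvStepA s = (pvGroups results).foldl pvGstep s := by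
  induction results using pvGroups.induct with
  | case1 => intro s; rw [pvGroups]; rfl
  | case2 x xs ih =>
    intro s
    obtain ⟨cur, lw, ll, sc⟩ := s
    have hsplit : x :: xs
        = (x :: xs.takeWhile (fun y => pvKey y == pvKey x))
          ++ xs.dropWhile (fun y => pvKey y == pvKey x) := by
      simp [List.takeWhile_append_dropWhile]
    conv_lhs => rw [hsplit]
    rw [List.foldl_append]
    rw [foldl_run x _ (fun y hy => by
      have := List.mem_takeWhile_imp hy
      exact eq_of_beq this) cur lw ll sc]
    rw [ih]
    conv_rhs => rw [pvGroups]
    rw [List.foldl_cons]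

-- head key of a group list produced from a nonempty list
theorem pvGroups_head (y : String) (ys : List String) :
    (pvGroups (y :: ys)).head? = some (pvKey y, 1 + (((ys.takeWhile (fun z => pvKey z == pvKey y)).length
      : Nat) : Int)) := by
  rw [pvGroups]; rfl

theorem dropWhile_head_not {α : Type} (p : α → Bool) :
    ∀ (l : List α) (a : α), (l.dropWhile p).head? = some a → p a = false := by
  intro l
  induction l with
  | nil => intro a h; simp [List.dropWhile] at h
  | cons x xs ih =>
    intro a h
    rw [List.dropWhile_cons] at h
    by_cases hp : p x = true
    · rw [if_pos hp] at h; exact ih a h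
    · rw [if_neg hp] at h
      simp at h
      subst h; simpa using hp

theorem pvGroups_pos (l : List String) : ∀ g ∈ pvGroups l, 1 ≤ g.2 := by
  induction l using pvGroups.induct with
  | case1 => simp [pvGroups]
  | case2 x xs ih =>
    intro g hg
    rw [pvGroups] at hg
    rcases List.mem_cons.mp hg with rfl | hg
    · simp
    · exact ih g hg

theorem pvGroups_keys (l : List String) :
    ∀ g ∈ pvGroups l, g.1 = "win" ∨ g.1 = "loss" ∨ g.1 = "draw" := by
  induction l using pvGroups.induct with
  | case1 => simp [pvGroups]
  | case2 x xs ih =>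
    intro g hg
    rw [pvGroups] at hg
    rcases List.mem_cons.mp hg with rfl | hg
    · exact pvKey_cases x
    · exact ih g hg

theorem pvGroups_chain (l : List String) :
    (pvGroups l).IsChain (fun a b => a.1 ≠ b.1) := by
  induction l using pvGroups.induct with
  | case1 => simp [pvGroups]
  | case2 x xs ih =>
    rw [pvGroups, List.isChain_cons]
    refine ⟨?_, ih⟩
    intro b hb
    cases hrest : xs.dropWhile (fun y => pvKey y == pvKey x) with
    | nil => rw [hrest] at hb; simp [pvGroups] at hb
    | cons y ys =>
      rw [hrest, pvGroups_head] at hb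
      simp only [Option.mem_def, Option.some.injEq] at hb
      have hpy := dropWhile_head_not (fun z => pvKey z == pvKey x) xs y (by rw [hrest]; rfl)
      simp only [beq_eq_false_iff_ne, ne_eq] at hpy
      subst hb
      simp only [ne_eq]
      exact fun h => hpy h.symm

-- accumulator shift for the streak-change counter
theorem cnd_acc (l : List (String × Int)) :
    ∀ c : Int, l.foldl (fun c g => if g.1 = "win" ∨ g.1 = "loss" then c + 1 else c) c
      = c + l.foldl (fun c g => if g.1 = "win" ∨ g.1 = "loss" then c + 1 else c) 0 := by
  induction l with
  | nil => simp
  | cons g l ih =>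
    intro c
    rw [List.foldl_cons, List.foldl_cons,
      ih (if g.1 = "win" ∨ g.1 = "loss" then c + 1 else c),
      ih (if g.1 = "win" ∨ g.1 = "loss" then (0 : Int) + 1 else 0)]
    split_ifs <;> omega

theorem evalG_spec :
    ∀ (gs : List (String × Int)) (cur lw ll sc : Int),
    (∀ g ∈ gs, 1 ≤ g.2) →
    (∀ g ∈ gs, g.1 = "win" ∨ g.1 = "loss" ∨ g.1 = "draw") →
    gs.IsChain (fun a b => a.1 ≠ b.1) →
    (∀ g ∈ gs.head?, (g.1 = "win" → cur ≤ 0) ∧ (g.1 = "loss" → 0 ≤ cur)) →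
    gs.foldl pvGstep (cur, lw, ll, sc) =
      ( (match gs.getLast? with
         | none => cur
         | some (k, n) => if k = "win" then n else if k = "loss" then -n else 0),
        gs.foldl (fun m g => if g.1 = "win" then max m g.2 else m) lw,
        gs.foldl (fun m g => if g.1 = "loss" then max m g.2 else m) ll,
        sc + (match gs with
          | [] => 0
          | _ :: _ => (if cur ≠ 0 then 1 else 0)
              + gs.dropLast.foldl (fun c g => if g.1 = "win" ∨ g.1 = "loss" then c + 1 else c) 0) ) := by
  intro gs
  induction gs with
  | nil => intro cur lw ll sc _ _ _ _; simp
  | cons g rest ih =>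
    intro cur lw ll sc hpos hkeys hchain hsign
    obtain ⟨k, n⟩ := g
    have hn : 1 ≤ n := hpos (k, n) (by simp)
    have hsg := hsign (k, n) (by simp)
    have hrpos : ∀ g ∈ rest, 1 ≤ g.2 := fun g hg => hpos g (by simp [hg])
    have hrkeys : ∀ g ∈ rest, g.1 = "win" ∨ g.1 = "loss" ∨ g.1 = "draw" :=
      fun g hg => hkeys g (by simp [hg])
    have hrchain : rest.IsChain (fun a b => a.1 ≠ b.1) := (List.isChain_cons.mp hchain).2
    have hne : ∀ b ∈ rest.head?, (k, n).1 ≠ b.1 := (List.isChain_cons.mp hchain).1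
    rcases hkeys (k, n) (by simp) with hk | hk | hk
    · -- win group
      subst hk
      have hcur : cur ≤ 0 := hsg.1 rfl
      have hstep : pvGstep (cur, lw, ll, sc) ("win", n)
          = (n, max lw n, ll, sc + (if cur ≠ 0 then 1 else 0)) := by
        simp [pvGstep, Prod.ext_iff]
        split_ifs <;> omega
      rw [List.foldl_cons, hstep,
        ih n (max lw n) ll (sc + (if cur ≠ 0 then 1 else 0)) hrpos hrkeys hrchain (by
          intro b hb
          have hbne := hne b hb
          constructor
          · intro hbw; exact absurd hbw.symm (by simpa using hbne)
          · intro _; omega)]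
      cases rest with
      | nil => simp
      | cons r rs =>
        simp only [List.foldl_cons, List.getLast?_cons_cons, List.dropLast_cons_of_ne_nil
          (List.cons_ne_nil r rs), Prod.mk.injEq]
        refine ⟨rfl, by simp, by simp, ?_⟩
        simp [show n ≠ 0 by omega]
        rw [cnd_acc ((r :: rs).dropLast) 1]
        split_ifs <;> omega
    · -- loss group
      subst hk
      have hcur : 0 ≤ cur := hsg.2 rfl
      have hstep : pvGstep (cur, lw, ll, sc) ("loss", n)
          = (-n, lw, max ll n, sc + (if cur ≠ 0 then 1 else 0)) := by
        simp [pvGstep, Prod.ext_iff]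
        split_ifs <;> omega
      rw [List.foldl_cons, hstep,
        ih (-n) lw (max ll n) (sc + (if cur ≠ 0 then 1 else 0)) hrpos hrkeys hrchain (by
          intro b hb
          have hbne := hne b hb
          constructor
          · intro _; omega
          · intro hbl; exact absurd hbl.symm (by simpa using hbne))]
      cases rest with
      | nil => simp
      | cons r rs =>
        simp only [List.foldl_cons, List.getLast?_cons_cons, List.dropLast_cons_of_ne_nil
          (List.cons_ne_nil r rs), Prod.mk.injEq]
        refine ⟨rfl, by simp, by simp, ?_⟩
        simp [show (-n : Int) ≠ 0 by omega]
        rw [cnd_acc ((r :: rs).dropLast) 1]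
        split_ifs <;> omega
    · -- draw group
      subst hk
      have hstep : pvGstep (cur, lw, ll, sc) ("draw", n)
          = (0, lw, ll, sc + (if cur ≠ 0 then 1 else 0)) := by
        simp [pvGstep]
      rw [List.foldl_cons, hstep,
        ih 0 lw ll (sc + (if cur ≠ 0 then 1 else 0)) hrpos hrkeys hrchain (by
          intro b hb; exact ⟨fun _ => le_refl 0, fun _ => le_refl 0⟩)]
      cases rest with
      | nil => simp
      | cons r rs =>
        simp only [List.foldl_cons, List.getLast?_cons_cons, List.dropLast_cons_of_ne_nil
          (List.cons_ne_nil r rs), Prod.mk.injEq]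
        refine ⟨rfl, by simp, by simp, ?_⟩
        simp
        split_ifs <;> omega

theorem ports_agree (results : List String) :
    analyze_streaks_py results = analyze_streaks_py_alt results := by
  unfold analyze_streaks_py analyze_streaks_py_alt
  by_cases hnil : results = []
  · subst hnil; simp [pvGroups]
  · rw [if_neg hnil]
    rw [foldl_groups results (0, 0, 0, 0)]
    rw [evalG_spec (pvGroups results) 0 0 0 0 (pvGroups_pos results) (pvGroups_keys results)
      (pvGroups_chain results) (by intro b _; exact ⟨fun _ => le_refl 0, fun _ => le_refl 0⟩)]
    cases hg : pvGroups results with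
    | nil => simp
    | cons g gs => simp

-- ===== VERDICT (by name: the statement is the Claim_ definition above) =====
theorem analyze_streaks_py_spec : Claim_equal_analyze_streaks_py := by
  intro results _
  unfold Spec_analyze_streaks_py
  exact ports_agree results
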